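-- pv_equiv track=rewrite | github.com/akshay-gupta123/round_1 | question1/matching.py | official
-- ===== SOURCE A (Python) =====
-- def official(name):
--     space = 0
--     lower = 0
--     special = 0
--     number = 0
--
--
--     for i in range(len(name)):
--         if (ord(name[i])>=48)and(ord(name[i])<=57):
--             number+=1
--         elif (ord(name[i]) >= 97)and(ord(name[i]) <= 122):
--             lower+=1
--         elif(ord(name[i])==32):
--             space+=1
--         elif not((ord(name[i])>=65) and (ord(name[i])<=90)):
--             special+=1
--
--     if( special or  number):
--         return 0
--     elif(not space):
--         return 0
--     elif((lower-space)==len(name)):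
--         return 0
--     else:
--         return 1
-- ===== SOURCE B (Python) =====
-- ALLOWED = set('ABCDEFGHIJKLMNOPQRSTUVWXYZabcdefghijklmnopqrstuvwxyz ')
--
--
-- def official(name):
--     chars = set(name)
--     return int(' ' in chars and chars <= ALLOWED)
-- ===== Notes on version B (the rewrite author's own statement) =====
-- stated objective: faster
-- what changed: B replaces A's per-index scan with four ord-range counters and a four-branch decision chain (one branch unreachable) by a set computation: build the set of distinct characters once and decide with two set queries (space membership, subset of the letters+space alphabet), moving the work into C-level set operations.
import Mathlib
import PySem

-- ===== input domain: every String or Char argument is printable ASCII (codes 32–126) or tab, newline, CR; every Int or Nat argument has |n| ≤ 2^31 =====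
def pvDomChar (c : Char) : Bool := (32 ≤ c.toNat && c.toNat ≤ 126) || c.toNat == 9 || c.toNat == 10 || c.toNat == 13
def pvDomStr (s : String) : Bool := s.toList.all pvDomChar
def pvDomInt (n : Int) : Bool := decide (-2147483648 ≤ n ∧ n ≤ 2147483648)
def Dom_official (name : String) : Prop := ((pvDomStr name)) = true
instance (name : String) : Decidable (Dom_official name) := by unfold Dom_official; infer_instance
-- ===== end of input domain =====

-- B replaces A's per-index four-counter scan and branch chain by a set computation:
-- the set of distinct characters is built once and the answer is two set queries.

-- ===== PORT A =====
-- loop body of A: classify one character into the four counters (space, lower, special, number)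
def officialStep (st : Int × Int × Int × Int) (c : Char) : Int × Int × Int × Int :=
  -- st = (space, lower, special, number)
  if 48 ≤ c.toNat ∧ c.toNat ≤ 57 then (st.1, st.2.1, st.2.2.1, st.2.2.2 + 1)
  else if 97 ≤ c.toNat ∧ c.toNat ≤ 122 then (st.1, st.2.1 + 1, st.2.2.1, st.2.2.2)
  else if c.toNat = 32 then (st.1 + 1, st.2.1, st.2.2.1, st.2.2.2)
  else if ¬(65 ≤ c.toNat ∧ c.toNat ≤ 90) then (st.1, st.2.1, st.2.2.1 + 1, st.2.2.2)
  else st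

def official (name : String) : Int :=
  let st := name.toList.foldl officialStep (0, 0, 0, 0)
  if st.2.2.1 ≠ 0 ∨ st.2.2.2 ≠ 0 then 0
  else if st.1 = 0 then 0
  else if st.2.1 - st.1 = (name.toList.length : Int) then 0
  else 1

-- ===== PORT B =====
-- the module-level constant ALLOWED = set('ABC…xyz ')
def officialALLOWED : PySem.Set Char :=
  PySem.Set.ofList "ABCDEFGHIJKLMNOPQRSTUVWXYZabcdefghijklmnopqrstuvwxyz ".toList

def official_alt (name : String) : Int :=
  let chars : PySem.Set Char := PySem.Set.ofList name.toList
  if PySem.Set.contains chars ' ' ∧ PySem.Set.issubset chars officialALLOWED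
  then 1 else 0

-- ===== PRECONDITION & SPEC =====
def Spec_official (name : String) (out : Int) : Prop := out = official_alt name
instance (name : String) (out : Int) : Decidable (Spec_official name out) := by unfold Spec_official; infer_instance

-- ===== CLAIM (what is proved, stated in full; the proofs are below) =====
def Claim_equal_official : Prop := ∀ (name : String), Dom_official name → Spec_official name (official name)

-- ===== LEMMAS AND PROOFS =====

-- the four character classes A counts
def pN (c : Char) : Bool := 48 ≤ c.toNat ∧ c.toNat ≤ 57
def pL (c : Char) : Bool := ¬(48 ≤ c.toNat ∧ c.toNat ≤ 57) ∧ 97 ≤ c.toNat ∧ c.toNat ≤ 122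
def pS (c : Char) : Bool := ¬(48 ≤ c.toNat ∧ c.toNat ≤ 57) ∧ ¬(97 ≤ c.toNat ∧ c.toNat ≤ 122) ∧ c.toNat = 32
def pX (c : Char) : Bool := ¬(48 ≤ c.toNat ∧ c.toNat ≤ 57) ∧ ¬(97 ≤ c.toNat ∧ c.toNat ≤ 122) ∧ c.toNat ≠ 32 ∧ ¬(65 ≤ c.toNat ∧ c.toNat ≤ 90)

theorem fold_eq (l : List Char) (a b c d : Int) :
    l.foldl officialStep (a, b, c, d) =
      (a + l.countP pS, b + l.countP pL, c + l.countP pX, d + l.countP pN) := by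
  induction l generalizing a b c d with
  | nil => simp
  | cons x t ih =>
    simp only [List.foldl_cons, officialStep]
    by_cases h1 : (48 ≤ x.toNat ∧ x.toNat ≤ 57) <;>
    by_cases h2 : (97 ≤ x.toNat ∧ x.toNat ≤ 122) <;>
    by_cases h3 : x.toNat = 32 <;>
    by_cases h4 : (65 ≤ x.toNat ∧ x.toNat ≤ 90) <;>
      simp [h1, h2, h3, h4, ih, pN, pL, pS, pX, Prod.ext_iff] <;> omega

-- codes of the ALLOWED constant, for the membership characterisation
def officialCodes : List Nat := officialALLOWED.map Char.toNat

set_option maxRecDepth 8192 in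
theorem mem_allowed (c : Char) :
    c ∈ officialALLOWED ↔
      (97 ≤ c.toNat ∧ c.toNat ≤ 122) ∨ (65 ≤ c.toNat ∧ c.toNat ≤ 90) ∨ c.toNat = 32 := by
  have h1 : c ∈ officialALLOWED ↔ c.toNat ∈ officialCodes := by
    unfold officialCodes
    constructor
    · intro h; exact List.mem_map_of_mem h
    · intro h
      obtain ⟨d, hd, he⟩ := List.mem_map.mp h
      exact (Char.ext (UInt32.toNat_inj.mp he)) ▸ hd
  rw [h1]
  by_cases hlt : c.toNat < 128
  · have key : ∀ n : Nat, n < 128 →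
        (n ∈ officialCodes ↔ (97 ≤ n ∧ n ≤ 122) ∨ (65 ≤ n ∧ n ≤ 90) ∨ n = 32) := by decide
    exact key c.toNat hlt
  · have hall : ∀ m ∈ officialCodes, m < 128 := by decide
    constructor
    · intro h; exact absurd (hall _ h) hlt
    · intro h; omega

theorem countP_split (l : List Char) (p : Char → Bool) :
    l.countP p + l.countP (fun c => !(p c)) = l.length := by
  induction l with
  | nil => simp
  | cons h t ih => by_cases hp : p h <;> simp [hp] <;> omega

theorem official_spec : Claim_equal_official := by
  intro name _
  unfold Spec_official official official_alt
  rw [fold_eq]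
  simp only [zero_add]
  set l := name.toList with hl
  have hcontains : PySem.Set.contains (PySem.Set.ofList l) ' ' = true ↔ ' ' ∈ l := by
    rw [PySem.Set.contains_iff]; exact PySem.Set.mem_ofList l ' '
  have hsub : PySem.Set.issubset (PySem.Set.ofList l) officialALLOWED = true ↔
      ∀ c ∈ l, c ∈ officialALLOWED := by
    rw [PySem.Set.issubset_iff]
    constructor
    · intro h c hc; exact h c ((PySem.Set.mem_ofList l c).mpr hc)
    · intro h c hc; exact h c ((PySem.Set.mem_ofList l c).mp hc)
  by_cases hall : ∀ c ∈ l, c ∈ officialALLOWED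
  · -- every character is an ASCII letter or space: no specials, no digits counted
    have hX : l.countP pX = 0 := by
      rw [List.countP_eq_zero]
      intro c hc
      have h := (mem_allowed c).mp (hall c hc)
      simp [pX]; omega
    have hN : l.countP pN = 0 := by
      rw [List.countP_eq_zero]
      intro c hc
      have h := (mem_allowed c).mp (hall c hc)
      simp [pN]; omega
    by_cases hsp : ' ' ∈ l
    · -- a space occurs: both sides return 1 (A's third branch cannot fire: lower + space ≤ length)
      have hSpos : 0 < l.countP pS := by
        rw [List.countP_pos_iff]
        exact ⟨' ', hsp, by simp [pS]⟩
      have h1 : l.countP pL ≤ l.countP (fun c => !(pS c)) := by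
        apply List.countP_mono_left
        intro c _ hc
        simp [pL, pS] at hc ⊢
        omega
      have h2 := countP_split l pS
      rw [if_neg (by simp [hX, hN]), if_neg (by omega), if_neg (by omega),
          if_pos ⟨hcontains.mpr hsp, hsub.mpr hall⟩]
    · -- no space: both sides return 0
      have hS : l.countP pS = 0 := by
        rw [List.countP_eq_zero]
        intro c hc hcS
        obtain ⟨-, -, h32⟩ := by simpa [pS] using hcS
        have hce : c = ' ' := Char.ext (UInt32.toNat_inj.mp (show c.val.toNat = (' ').val.toNat from h32))
        exact hsp (hce ▸ hc)
      rw [if_neg (by simp [hX, hN]), if_pos (by simp [hS])]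
      rw [if_neg (fun ⟨hin, _⟩ => hsp (hcontains.mp hin))]
  · -- some character is disallowed: A counted a special or a digit, B's subset test fails
    obtain ⟨c, hc, hnc⟩ : ∃ c ∈ l, c ∉ officialALLOWED := by
      simpa using hall
    have h := mem_allowed c
    have hb1 : ¬(97 ≤ c.toNat ∧ c.toNat ≤ 122) := fun hh => hnc (h.mpr (Or.inl hh))
    have hb2 : ¬(65 ≤ c.toNat ∧ c.toNat ≤ 90) := fun hh => hnc (h.mpr (Or.inr (Or.inl hh)))
    have hb3 : c.toNat ≠ 32 := fun hh => hnc (h.mpr (Or.inr (Or.inr hh)))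
    have hpos : 0 < l.countP pX ∨ 0 < l.countP pN := by
      by_cases hn : (48 ≤ c.toNat ∧ c.toNat ≤ 57)
      · right
        rw [List.countP_pos_iff]
        exact ⟨c, hc, by simp [pN]; omega⟩
      · left
        rw [List.countP_pos_iff]
        exact ⟨c, hc, by simp [pX]; omega⟩
    rw [if_pos (by omega), if_neg (fun ⟨_, hA⟩ => hnc (hsub.mp hA c hc))]
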